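-- pv_equiv track=rewrite | github.com/xiao0916/lm-skills | skills/component-analyzer/scripts/split_suggester.py | _generate_merged_component_name
-- ===== SOURCE A (Python) =====
-- from typing import Dict, List, Any, Optional
--
-- def _generate_merged_component_name(components: List[str]) -> str:
--     """根据组件列表生成合并后的名称"""
--     if not components:
--         return "UnifiedComponent"
--
--     # 寻找共同前缀
--     common_prefix = components[0]
--     for comp in components[1:]:
--         i = 0
--         while i < len(common_prefix) and i < len(comp) and common_prefix[i] == comp[i]:
--             i += 1
--         common_prefix = common_prefix[:i]
--
--     if common_prefix and len(common_prefix) >= 2: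
--         return f"{common_prefix}Base"
--     else:
--         return "UnifiedComponent"
-- ===== SOURCE B (Python) =====
-- def _generate_merged_component_name(components):
--     """Column-wise common-prefix scan across all components at once."""
--     if not components:
--         return "UnifiedComponent"
--     prefix_chars = []
--     for col in zip(*components):
--         if len(set(col)) == 1:
--             prefix_chars.append(col[0])
--         else:
--             break
--     prefix = "".join(prefix_chars)
--     if len(prefix) >= 2:
--         return f"{prefix}Base"
--     return "UnifiedComponent"
-- ===== Notes on version B (the rewrite author's own statement) =====
-- stated objective: alternative
-- what changed: Computes the common prefix column-wise over zip(*components) (all strings scanned simultaneously, growing a prefix) instead of pairwise narrowing of a shrinking slice string-by-string.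
import Mathlib
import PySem

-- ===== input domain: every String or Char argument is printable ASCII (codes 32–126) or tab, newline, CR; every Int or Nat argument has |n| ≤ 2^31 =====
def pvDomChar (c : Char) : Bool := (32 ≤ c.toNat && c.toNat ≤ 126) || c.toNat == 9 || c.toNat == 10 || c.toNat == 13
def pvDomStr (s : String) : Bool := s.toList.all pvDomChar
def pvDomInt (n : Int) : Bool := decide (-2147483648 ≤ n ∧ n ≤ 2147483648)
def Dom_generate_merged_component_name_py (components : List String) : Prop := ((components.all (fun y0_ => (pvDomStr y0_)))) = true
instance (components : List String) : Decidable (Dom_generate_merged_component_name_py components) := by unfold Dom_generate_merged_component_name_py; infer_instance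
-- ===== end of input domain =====

-- B replaces A's pairwise prefix-narrowing fold by a single column-wise scan of all strings (alternative decomposition, same cost).

-- ===== PORT A =====
-- the inner `while` loop of A: index i advances while both strings agree
def pvLcpLenA : List Char → List Char → Nat
  | a :: as, b :: bs => if a = b then pvLcpLenA as bs + 1 else 0
  | _, _ => 0

def generate_merged_component_name_py (components : List String) : String :=
  match components with
  | [] => "UnifiedComponent"
  | c0 :: rest =>
    let common := rest.foldl (fun p comp => p.take (pvLcpLenA p comp.toList)) c0.toList
    if common ≠ [] ∧ 2 ≤ common.length then String.ofList (common ++ "Base".toList)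
    else "UnifiedComponent"

-- ===== PORT B =====
-- the `for col in zip(*components)` loop: one column at a time, stop when the column disagrees
def pvColScanB : List Char → List (List Char) → List Char
  | [], _ => []
  | c :: cs, rest =>
    if rest.all (fun r => r.head? = some c)
    then c :: pvColScanB cs (rest.map (List.drop 1))
    else []

def generate_merged_component_name_py_alt (components : List String) : String :=
  match components with
  | [] => "UnifiedComponent"
  | c0 :: rest =>
    let pref := pvColScanB c0.toList (rest.map String.toList)
    if 2 ≤ pref.length then String.ofList (pref ++ "Base".toList)
    else "UnifiedComponent"

-- ===== PRECONDITION & SPEC =====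
def Spec_generate_merged_component_name_py (components : List String) (out : String) : Prop := out = generate_merged_component_name_py_alt components
instance (components : List String) (out : String) : Decidable (Spec_generate_merged_component_name_py components out) := by unfold Spec_generate_merged_component_name_py; infer_instance

-- ===== CLAIM (what is proved, stated in full; the proofs are below) =====
def Claim_equal_generate_merged_component_name_py : Prop := ∀ (components : List String), Dom_generate_merged_component_name_py components → Spec_generate_merged_component_name_py components (generate_merged_component_name_py components)

-- ===== LEMMAS AND PROOFS =====

-- mathematical longest-common-prefix of two lists, the common value of both loops
def pvLcp : List Char → List Char → List Char
  | a :: as, b :: bs => if a = b then a :: pvLcp as bs else []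
  | _, _ => []

theorem take_pvLcpLenA (p c : List Char) : p.take (pvLcpLenA p c) = pvLcp p c := by
  induction p generalizing c with
  | nil => cases c <;> simp [pvLcpLenA, pvLcp]
  | cons a as ih =>
    cases c with
    | nil => simp [pvLcpLenA, pvLcp]
    | cons b bs =>
      by_cases h : a = b <;> simp [pvLcpLenA, pvLcp, h, ih]

theorem pvColScanB_nil (a : List Char) : pvColScanB a [] = a := by
  induction a with
  | nil => rfl
  | cons c cs ih => simp [pvColScanB, ih]

theorem pvColScanB_cons (a r : List Char) (rest : List (List Char)) :
    pvColScanB a (r :: rest) = pvColScanB (pvLcp a r) rest := by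
  induction a generalizing r rest with
  | nil => cases r <;> simp [pvColScanB, pvLcp]
  | cons c cs ih =>
    cases r with
    | nil => simp [pvColScanB, pvLcp]
    | cons d ds =>
      by_cases h : d = c
      · subst h
        by_cases hall : rest.all (fun r => r.head? = some d)
        · simp [pvColScanB, pvLcp, hall, ih]
        · simp [pvColScanB, pvLcp, hall]
      · have hcd : ¬ c = d := fun hh => h hh.symm
        simp [pvColScanB, pvLcp, h, hcd]

theorem fold_eq_colScan (rest : List (List Char)) (a : List Char) :
    rest.foldl (fun p comp => p.take (pvLcpLenA p comp)) a = pvColScanB a rest := by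
  induction rest generalizing a with
  | nil => simp [pvColScanB_nil]
  | cons r rs ih =>
    rw [List.foldl_cons, ih, take_pvLcpLenA, pvColScanB_cons]

-- ===== VERDICT (by name: the statement is the Claim_ definition above) =====
theorem generate_merged_component_name_py_spec : Claim_equal_generate_merged_component_name_py := by
  intro components _
  unfold Spec_generate_merged_component_name_py
  cases components with
  | nil => rfl
  | cons c0 rest =>
    simp only [generate_merged_component_name_py, generate_merged_component_name_py_alt]
    have hfold : rest.foldl (fun p comp => p.take (pvLcpLenA p comp.toList)) c0.toList
        = pvColScanB c0.toList (rest.map String.toList) := by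
      rw [← fold_eq_colScan, List.foldl_map]
    rw [hfold]
    set pr := pvColScanB c0.toList (rest.map String.toList) with hpr
    by_cases h2 : 2 ≤ pr.length
    · have hne : pr ≠ [] := by
        intro h; rw [h] at h2; simp at h2
      simp [h2, hne]
    · simp [h2]
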